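-- pv_equiv track=rewrite | github.com/sangminsang/mahjong_yolo_project | apis/score/logic.py | is_daisangen
-- ===== SOURCE A (Python) =====
-- def is_daisangen(bodies, ankan_sets, ming_sets):
--     """대삼원 판정 (개정판)"""
--     dragons = {'5z':0, '6z':0, '7z':0}
--
--     # 1. 일반 몸통에서 카운트
--     for body in bodies:
--         tile = body[0]
--         if tile in dragons:
--             dragons[tile] += len(body)
--
--     # 2. 안깡 추가
--     for ankan in ankan_sets:
--         tile = ankan[0]
--         if tile in dragons:
--             dragons[tile] +=4
--
--     # 3. 밍깡 추가
--     for ming_type, ming_set in ming_sets: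
--         tile = ming_set[0]
--         if tile in dragons:
--             dragons[tile] += len(ming_set)
--
--     return all(count >=3 for count in dragons.values())
-- ===== SOURCE B (Python) =====
-- def is_daisangen(bodies, ankan_sets, ming_sets):
--     """Check the big-three-dragons condition: per fixed dragon tile, total its
--     melds in one expression and fail fast, instead of accumulating a dict."""
--     for dragon in ('5z', '6z', '7z'):
--         total = (sum(len(b) for b in bodies if b[0] == dragon)
--                  + 4 * sum(1 for a in ankan_sets if a[0] == dragon)
--                  + sum(len(s) for _, s in ming_sets if s[0] == dragon))
--         if total < 3:
--             return False
--     return True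
-- ===== Notes on version B (the rewrite author's own statement) =====
-- stated objective: simpler
-- what changed: Instead of threading a mutable dict of dragon counters through three separate loops and reading all its values at the end, B iterates over the three fixed dragon tiles, computes each dragon's total as one sum expression over the three inputs, and returns False as soon as one total is below 3.
import Mathlib
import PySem

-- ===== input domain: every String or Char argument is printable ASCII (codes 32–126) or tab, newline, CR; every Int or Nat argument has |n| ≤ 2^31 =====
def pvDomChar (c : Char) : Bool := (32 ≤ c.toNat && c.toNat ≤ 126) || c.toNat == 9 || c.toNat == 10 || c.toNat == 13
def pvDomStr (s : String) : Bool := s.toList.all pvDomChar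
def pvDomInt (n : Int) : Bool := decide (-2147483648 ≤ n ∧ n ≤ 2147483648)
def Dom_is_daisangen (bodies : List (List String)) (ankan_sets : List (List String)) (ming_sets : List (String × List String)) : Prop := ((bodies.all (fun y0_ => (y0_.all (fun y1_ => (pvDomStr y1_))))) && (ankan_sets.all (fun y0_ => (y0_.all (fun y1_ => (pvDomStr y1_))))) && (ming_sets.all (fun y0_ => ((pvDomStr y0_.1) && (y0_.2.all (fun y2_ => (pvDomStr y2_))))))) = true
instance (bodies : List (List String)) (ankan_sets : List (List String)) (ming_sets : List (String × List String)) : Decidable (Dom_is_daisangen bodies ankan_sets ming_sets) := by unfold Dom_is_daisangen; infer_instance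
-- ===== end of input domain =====

-- B totals each of the three fixed dragon tiles in one expression and fails fast,
-- instead of A's dict of counters threaded through three loops (objective: simpler).

-- ===== PORT A =====
-- first element of a meld (Python's `xs[0]`; Pre_ guarantees the list is nonempty,
-- so the `.getD ""` default is never reached on admitted inputs)
def pvTile (xs : List String) : String := (PySem.List.pyGet? xs 0).getD ""

def is_daisangen (bodies : List (List String)) (ankan_sets : List (List String)) (ming_sets : List (String × List String)) : Bool :=
  -- dragons = {'5z':0,'6z':0,'7z':0}; three for-loops each doing `if tile in dragons: dragons[tile] += …`
  ((ming_sets.foldl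
      (fun d p => if d.contains (pvTile p.2) then d.modify (pvTile p.2) 0 (· + (p.2.length : Int)) else d)
      (ankan_sets.foldl
        (fun d a => if d.contains (pvTile a) then d.modify (pvTile a) 0 (· + 4) else d)
        (bodies.foldl
          (fun d b => if d.contains (pvTile b) then d.modify (pvTile b) 0 (· + (b.length : Int)) else d)
          (PySem.Dict.ofList [("5z", (0 : Int)), ("6z", 0), ("7z", 0)])))).values).all
    (fun count => decide (3 ≤ count))

-- ===== PORT B =====
-- one dragon's total over all three inputs (Source B's `total = …` expression)
def pvDragonTotal (bodies : List (List String)) (ankan_sets : List (List String)) (ming_sets : List (String × List String)) (dragon : String) : Int :=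
  ((bodies.filter (fun b => pvTile b == dragon)).map (fun b => (b.length : Int))).sum
  + 4 * ((ankan_sets.filter (fun a => pvTile a == dragon)).map (fun _ => (1 : Int))).sum
  + ((ming_sets.filter (fun p => pvTile p.2 == dragon)).map (fun p => (p.2.length : Int))).sum

def is_daisangen_alt (bodies : List (List String)) (ankan_sets : List (List String)) (ming_sets : List (String × List String)) : Bool :=
  ["5z", "6z", "7z"].all (fun dragon => decide (3 ≤ pvDragonTotal bodies ankan_sets ming_sets dragon))

-- ===== PRECONDITION & SPEC =====
-- Pre_ excludes inputs with an empty inner meld list, on which A (and B alike) raises IndexError at `…[0]`.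
def Pre_is_daisangen (bodies : List (List String)) (ankan_sets : List (List String)) (ming_sets : List (String × List String)) : Prop :=
  (∀ b ∈ bodies, b ≠ []) ∧ (∀ a ∈ ankan_sets, a ≠ []) ∧ (∀ p ∈ ming_sets, p.2 ≠ [])
instance (bodies : List (List String)) (ankan_sets : List (List String)) (ming_sets : List (String × List String)) : Decidable (Pre_is_daisangen bodies ankan_sets ming_sets) := by unfold Pre_is_daisangen; infer_instance

def pvWitness_is_daisangen : List (List String) × List (List String) × (List (String × List String)) :=
  ([["5z", "5z", "5z"], ["1m", "1m", "1m"]], [["6z", "6z", "6z", "6z"]], [("pon", ["7z", "7z", "7z"])])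

def Spec_is_daisangen (bodies : List (List String)) (ankan_sets : List (List String)) (ming_sets : List (String × List String)) (out : Bool) : Prop := out = is_daisangen_alt bodies ankan_sets ming_sets
instance (bodies : List (List String)) (ankan_sets : List (List String)) (ming_sets : List (String × List String)) (out : Bool) : Decidable (Spec_is_daisangen bodies ankan_sets ming_sets out) := by unfold Spec_is_daisangen; infer_instance

-- ===== CLAIM (what is proved, stated in full; the proofs are below) =====
def Claim_equal_is_daisangen : Prop := ∀ (bodies : List (List String)) (ankan_sets : List (List String)) (ming_sets : List (String × List String)), Dom_is_daisangen bodies ankan_sets ming_sets → Pre_is_daisangen bodies ankan_sets ming_sets → Spec_is_daisangen bodies ankan_sets ming_sets (is_daisangen bodies ankan_sets ming_sets)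

-- ===== LEMMAS AND PROOFS =====

-- one counting loop of A preserves the dict's key list
theorem pv_keys_fold {α : Type} (key : α → String) (w : α → Int) (l : List α) (d : PySem.Dict String Int) :
    (l.foldl (fun d x => if d.contains (key x) then d.modify (key x) 0 (· + w x) else d) d).keys = d.keys := by
  induction l generalizing d with
  | nil => rfl
  | cons x l ih =>
      simp only [List.foldl_cons]
      rw [ih]
      by_cases h : d.contains (key x)
      · simp only [h, if_true]
        rw [PySem.Dict.keys_modify, PySem.Dict.keys_insert_of_contains _ _ h]
      · simp [h]

-- one counting loop of A adds, at each dragon key, exactly the filtered-sum B computes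
theorem pv_getD_fold {α : Type} (key : α → String) (w : α → Int) (l : List α) (d : PySem.Dict String Int)
    (k : String) (hk : k ∈ d.keys) :
    (l.foldl (fun d x => if d.contains (key x) then d.modify (key x) 0 (· + w x) else d) d).getD k 0
      = d.getD k 0 + ((l.filter (fun x => key x == k)).map w).sum := by
  induction l generalizing d with
  | nil => simp
  | cons x l ih =>
      simp only [List.foldl_cons, List.filter_cons]
      by_cases h : d.contains (key x)
      · have hk' : k ∈ (d.modify (key x) 0 (· + w x)).keys := by
          rw [PySem.Dict.keys_modify, PySem.Dict.keys_insert_of_contains _ _ h]; exact hk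
        simp only [h, if_true]
        rw [ih _ hk']
        by_cases hke : key x = k
        · subst hke
          simp
          ring
        · have : (key x == k) = false := by simp [hke]
          simp only [this]
          simp [PySem.Dict.getD_modify, Ne.symm hke]
      · have hne : (key x == k) = false := by
          by_contra hc
          have : key x = k := by simpa using hc
          subst this
          exact absurd ((PySem.Dict.contains_iff_mem_keys d (key x)).mpr hk) (by simp [h])
        simp only [h, hne]
        exact ih _ hk

-- ===== VERDICT (by name: the statement is the Claim_ definition above) =====
theorem is_daisangen_spec : Claim_equal_is_daisangen := by
  unfold Claim_equal_is_daisangen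
  intro bodies ankan_sets ming_sets _ _
  unfold Spec_is_daisangen is_daisangen is_daisangen_alt
  -- name the three successive dict states
  set d0 : PySem.Dict String Int := PySem.Dict.ofList [("5z", (0 : Int)), ("6z", 0), ("7z", 0)] with hd0
  set d1 := bodies.foldl
      (fun d b => if d.contains (pvTile b) then d.modify (pvTile b) 0 (· + (b.length : Int)) else d) d0 with hd1
  set d2 := ankan_sets.foldl
      (fun d a => if d.contains (pvTile a) then d.modify (pvTile a) 0 (· + 4) else d) d1 with hd2
  set d3 := ming_sets.foldl
      (fun d p => if d.contains (pvTile p.2) then d.modify (pvTile p.2) 0 (· + (p.2.length : Int)) else d) d2 with hd3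
  have hk0 : d0.keys = ["5z", "6z", "7z"] := by decide
  have hk1 : d1.keys = ["5z", "6z", "7z"] := by
    rw [hd1, pv_keys_fold (fun b => pvTile b) (fun b => (b.length : Int))]; exact hk0
  have hk2 : d2.keys = ["5z", "6z", "7z"] := by
    rw [hd2, pv_keys_fold (fun a => pvTile a) (fun _ => (4 : Int))]; exact hk1
  have hk3 : d3.keys = ["5z", "6z", "7z"] := by
    rw [hd3, pv_keys_fold (fun p : String × List String => pvTile p.2) (fun p => (p.2.length : Int))]; exact hk2
  have htot : ∀ k ∈ (["5z", "6z", "7z"] : List String),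
      d3.getD k 0 = pvDragonTotal bodies ankan_sets ming_sets k := by
    intro k hk
    have h3 := pv_getD_fold (fun p : String × List String => pvTile p.2) (fun p => (p.2.length : Int))
      ming_sets d2 k (by rw [hk2]; exact hk)
    have h2 := pv_getD_fold (fun a : List String => pvTile a) (fun _ => (4 : Int))
      ankan_sets d1 k (by rw [hk1]; exact hk)
    have h1 := pv_getD_fold (fun b : List String => pvTile b) (fun b => (b.length : Int))
      bodies d0 k (by rw [hk0]; exact hk)
    have h0 : d0.getD k 0 = 0 := by
      fin_cases hk <;> decide
    rw [← hd1] at h1; rw [← hd2] at h2; rw [← hd3] at h3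
    rw [h3, h2, h1, h0]
    unfold pvDragonTotal
    have hconst : ∀ (l : List (List String)),
        ((l.filter (fun a => pvTile a == k)).map (fun _ => (4 : Int))).sum
          = 4 * ((l.filter (fun a => pvTile a == k)).map (fun _ => (1 : Int))).sum := by
      intro l
      induction (l.filter (fun a => pvTile a == k)) with
      | nil => simp
      | cons y ys ih => simp only [List.map_cons, List.sum_cons, ih]; ring
    rw [hconst]
    ring
  have hvals : d3.values = ["5z", "6z", "7z"].map (fun k => d3.getD k 0) := by
    rw [PySem.Dict.values_eq_map_keys d3 (by rw [hk3]; decide) 0, hk3]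
  rw [hvals]
  have h5 := htot "5z" (by simp)
  have h6 := htot "6z" (by simp)
  have h7 := htot "7z" (by simp)
  simp only [List.map_cons, List.map_nil, List.all_cons, List.all_nil, h5, h6, h7]
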